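-- pv_equiv track=rewrite | github.com/Safronus/CtyrlistkotekaCZ | pdf_generator.py | generate_location_list
-- ===== SOURCE A (Python) =====
-- def generate_location_list(total_images, seznam_lokaci):
--     """Vygeneruje seznam lokací pro všechny obrázky"""
--     if not seznam_lokaci:
--         return [1] * total_images  # Výchozí lokace 1
--
--     # Opakuje seznam lokací dokud nepokryje všechny obrázky
--     extended_list = []
--     while len(extended_list) < total_images:
--         remaining = total_images - len(extended_list)
--         if remaining >= len(seznam_lokaci):
--             extended_list.extend(seznam_lokaci)
--         else:
--             extended_list.extend(seznam_lokaci[:remaining])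
--
--     return extended_list
-- ===== SOURCE B (Python) =====
-- def generate_location_list(total_images, seznam_lokaci):
--     """Vygeneruje seznam lokaci pro vsechny obrazky (closed-form tiling)."""
--     if not seznam_lokaci:
--         return [1] * total_images
--     n = max(0, total_images)
--     q = n // len(seznam_lokaci) + 1
--     return (seznam_lokaci * q)[:n]
-- ===== Notes on version B (the rewrite author's own statement) =====
-- stated objective: idiomatic
-- what changed: Replaces the accumulation while-loop with a closed-form tiling: repeat the location list enough times by list multiplication and truncate with a slice.
import Mathlib
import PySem

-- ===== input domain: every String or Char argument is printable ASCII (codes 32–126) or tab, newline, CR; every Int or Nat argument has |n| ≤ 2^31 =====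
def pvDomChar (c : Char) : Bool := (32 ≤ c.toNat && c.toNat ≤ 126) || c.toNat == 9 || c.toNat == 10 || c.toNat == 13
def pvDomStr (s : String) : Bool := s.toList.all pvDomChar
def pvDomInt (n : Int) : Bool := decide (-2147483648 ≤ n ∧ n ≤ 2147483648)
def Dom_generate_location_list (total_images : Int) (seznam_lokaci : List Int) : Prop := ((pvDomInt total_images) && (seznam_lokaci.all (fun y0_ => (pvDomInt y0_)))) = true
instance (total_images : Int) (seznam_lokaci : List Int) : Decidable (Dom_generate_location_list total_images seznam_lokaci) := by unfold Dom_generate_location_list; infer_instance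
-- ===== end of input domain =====

-- B replaces A's accumulation while-loop by the closed-form repeat-then-truncate tiling (idiomatic, same cost).

-- ===== PORT A =====
-- the while-loop of A; terminates because each iteration appends at least one element (seznam ≠ [])
def gll_loop (total_images : Int) (seznam : List Int) (hs : seznam ≠ []) (ext : List Int) : List Int :=
  if (ext.length : Int) < total_images then
    let remaining := total_images - (ext.length : Int)
    if remaining ≥ (seznam.length : Int) then
      gll_loop total_images seznam hs (ext ++ seznam)
    else
      gll_loop total_images seznam hs (ext ++ PySem.List.slice seznam none (some remaining))
  else ext
termination_by (total_images - (ext.length : Int)).toNat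
decreasing_by
  · have h1 : 1 ≤ seznam.length := List.length_pos_iff.mpr hs
    simp only [List.length_append]
    omega
  · have h1 : 1 ≤ seznam.length := List.length_pos_iff.mpr hs
    have h2 : (0:Int) ≤ total_images - (ext.length : Int) := by omega
    simp only [List.length_append, PySem.List.slice_to _ h2, List.length_take]
    omega

def generate_location_list (total_images : Int) (seznam_lokaci : List Int) : List Int :=
  if h : seznam_lokaci = [] then
    PySem.List.pyRepeat [1] total_images
  else
    gll_loop total_images seznam_lokaci h []

-- ===== PORT B =====
def generate_location_list_alt (total_images : Int) (seznam_lokaci : List Int) : List Int :=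
  if seznam_lokaci = [] then
    PySem.List.pyRepeat [1] total_images
  else
    let n : Int := max 0 total_images
    let q : Int := PySem.Int.floordiv n (seznam_lokaci.length : Int) + 1
    PySem.List.slice (PySem.List.pyRepeat seznam_lokaci q) none (some n)

-- ===== PRECONDITION & SPEC =====
def Spec_generate_location_list (total_images : Int) (seznam_lokaci : List Int) (out : List Int) : Prop := out = generate_location_list_alt total_images seznam_lokaci
instance (total_images : Int) (seznam_lokaci : List Int) (out : List Int) : Decidable (Spec_generate_location_list total_images seznam_lokaci out) := by unfold Spec_generate_location_list; infer_instance

-- ===== CLAIM (what is proved, stated in full; the proofs are below) =====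
def Claim_equal_generate_location_list : Prop := ∀ (total_images : Int) (seznam_lokaci : List Int), Dom_generate_location_list total_images seznam_lokaci → Spec_generate_location_list total_images seznam_lokaci (generate_location_list total_images seznam_lokaci)

-- ===== LEMMAS AND PROOFS =====

-- canonical "first n elements of the infinite repetition of s"
def cyc (s : List Int) (n : Nat) : List Int :=
  if hs : s.length = 0 then []
  else if n = 0 then []
  else if s.length ≤ n then s ++ cyc s (n - s.length)
  else s.take n
termination_by n
decreasing_by omega

theorem gll_loop_eq_cyc (total_images : Int) (seznam : List Int) (hs : seznam ≠ []) (ext : List Int) :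
    gll_loop total_images seznam hs ext = ext ++ cyc seznam (total_images - (ext.length : Int)).toNat := by
  induction ext using gll_loop.induct total_images seznam hs with
  | case1 ext hlt remaining hge ih =>
      rw [gll_loop]
      simp only [hlt, if_pos]
      rw [if_pos (show total_images - (ext.length : Int) ≥ (seznam.length : Int) by
        simpa [remaining] using hge)]
      rw [ih]
      have h1 : 1 ≤ seznam.length := List.length_pos_iff.mpr hs
      have hne : ¬ seznam.length = 0 := by omega
      have hn0 : ¬ (total_images - (ext.length : Int)).toNat = 0 := by omega
      have hle : seznam.length ≤ (total_images - (ext.length : Int)).toNat := by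
        simp only [remaining, ge_iff_le] at hge; omega
      conv_rhs => rw [cyc]
      rw [dif_neg hne, if_neg hn0, if_pos hle]
      have harg : (total_images - ((ext ++ seznam).length : Int)).toNat
          = (total_images - (ext.length : Int)).toNat - seznam.length := by
        simp only [List.length_append]; omega
      rw [harg, List.append_assoc]
  | case2 ext hlt remaining hge ih =>
      rw [gll_loop]
      simp only [hlt, if_pos]
      rw [if_neg (show ¬ total_images - (ext.length : Int) ≥ (seznam.length : Int) by
        simpa [remaining] using hge)]
      simp only [remaining] at hge
      rw [ih]
      have h1 : 1 ≤ seznam.length := List.length_pos_iff.mpr hs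
      have h2 : (0:Int) ≤ total_images - (ext.length : Int) := by omega
      rw [PySem.List.slice_to _ h2]
      have hne : ¬ seznam.length = 0 := by omega
      have hn0 : ¬ (total_images - (ext.length : Int)).toNat = 0 := by omega
      have hrem : (total_images - (ext.length : Int)).toNat < seznam.length := by
        simp only [ge_iff_le, not_le] at hge; omega
      have hnle : ¬ seznam.length ≤ (total_images - (ext.length : Int)).toNat := by omega
      have hz : (total_images - ((ext ++ seznam.take (total_images - (ext.length : Int)).toNat).length : Int)).toNat = 0 := by
        simp only [List.length_append, List.length_take]; omega
      rw [hz]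
      conv_rhs => rw [cyc]
      rw [dif_neg hne, if_neg hn0, if_neg hnle]
      rw [cyc, dif_neg hne]
      simp
  | case3 ext hlt =>
      rw [gll_loop]
      simp only [hlt, if_neg]
      have : (total_images - (ext.length : Int)).toNat = 0 := by omega
      rw [this, cyc]
      simp

theorem take_flatten_replicate (s : List Int) (hs : s ≠ []) (q n : Nat) (hq : n ≤ q * s.length) :
    ((List.replicate q s).flatten).take n = cyc s n := by
  induction q generalizing n with
  | zero =>
      have : n = 0 := by simpa using hq
      subst this
      simp [cyc]
  | succ q ih =>
      have h1 : 1 ≤ s.length := List.length_pos_iff.mpr hs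
      rw [List.replicate_succ, List.flatten_cons, List.take_append]
      rw [cyc]
      have hne : ¬ s.length = 0 := by omega
      by_cases hn0 : n = 0
      · subst hn0; simp
      by_cases hle : s.length ≤ n
      · simp only [hne, hn0, hle, dif_neg, if_pos]
        rw [List.take_of_length_le hle]
        congr 1
        exact ih (n - s.length) (by
          have hmul : (q + 1) * s.length = q * s.length + s.length := by ring
          omega)
      · simp only [hne, hn0, hle, dif_neg, if_neg]
        have hz : n - s.length = 0 := by omega
        simp [hz]

-- ===== VERDICT (by name: the statement is the Claim_ definition above) =====
theorem generate_location_list_spec : Claim_equal_generate_location_list := by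
  intro t s _
  unfold Spec_generate_location_list generate_location_list generate_location_list_alt
  by_cases hs : s = []
  · simp [hs]
  · rw [dif_neg hs, if_neg hs]
    rw [gll_loop_eq_cyc]
    have h1 : 1 ≤ s.length := List.length_pos_iff.mpr hs
    have hn : (0:Int) ≤ max 0 t := by omega
    rw [PySem.List.slice_to _ hn]
    unfold PySem.List.pyRepeat
    have hfd : PySem.Int.floordiv (max 0 t) (s.length : Int) = ((max 0 t).toNat / s.length : Nat) := by
      have := PySem.Int.floordiv_natCast (max 0 t).toNat s.length
      rw [← this]
      congr 1
      omega
    rw [take_flatten_replicate s hs _ _ ?_]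
    · rw [List.nil_append]
      have harg : (t - (([] : List Int).length : Int)).toNat = (max 0 t).toNat := by
        simp only [List.length_nil, Int.natCast_zero, sub_zero]; omega
      rw [harg]
    · rw [hfd]
      have hq : (((max 0 t).toNat / s.length : Nat) : Int) + 1 = ((((max 0 t).toNat / s.length) + 1 : Nat) : Int) := by push_cast; ring
      rw [hq, Int.toNat_natCast]
      have := Nat.div_add_mod (max 0 t).toNat s.length
      have := Nat.mod_lt (max 0 t).toNat (by omega : 0 < s.length)
      nlinarith [Nat.div_add_mod (max 0 t).toNat s.length]
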